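-- pv_equiv track=rewrite | github.com/cRoberts2-18/StarLizardQuestions | StarLizard Q1.py | function
-- ===== SOURCE A (Python) =====
-- def function(outfits,money):
--     possibleCombinations=[]
--     maxLen=0
--     for i in range(0,len(outfits)):
--         MoneySpent=0
--         tempArray=[]
--         for j in range(0,len(outfits)-i):
--             MoneySpent+=outfits[i+j]
--             if MoneySpent<=money:
--                 tempArray.append(outfits[i+j])
--         possibleCombinations.append(tempArray)
--
--     for i in range(0,len(possibleCombinations)):
--         if maxLen<len(possibleCombinations[i]):
--             maxLen=len(possibleCombinations[i])
--
--
--     return(maxLen)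
-- ===== SOURCE B (Python) =====
-- def _bisect_right(a, x):
--     lo = 0
--     hi = len(a)
--     while lo < hi:
--         mid = (lo + hi) // 2
--         if x < a[mid]:
--             hi = mid
--         else:
--             lo = mid + 1
--     return lo
--
--
-- def function(outfits, money):
--     prefix = [0]
--     for x in outfits:
--         prefix.append(prefix[-1] + x)
--     n = len(outfits)
--     best = 0
--     tail = []  # sorted multiset of prefix[i+1..n]
--     for i in range(n - 1, -1, -1):
--         v = prefix[i + 1]
--         tail.insert(_bisect_right(tail, v), v)
--         cnt = _bisect_right(tail, prefix[i] + money)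
--         if cnt > best:
--             best = cnt
--     return best
-- ===== Notes on version B (the rewrite author's own statement) =====
-- stated objective: faster
-- what changed: B maintains a sorted array of the suffix prefix sums, scanning start indices right-to-left: each start's affordable count is a single hand-written bisect_right of prefix[i]+money into that array (and the new prefix sum is inserted at its bisect position), replacing A's per-start inner rescan that re-accumulates sums and materialises a list per start plus a second max pass.
import Mathlib
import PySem

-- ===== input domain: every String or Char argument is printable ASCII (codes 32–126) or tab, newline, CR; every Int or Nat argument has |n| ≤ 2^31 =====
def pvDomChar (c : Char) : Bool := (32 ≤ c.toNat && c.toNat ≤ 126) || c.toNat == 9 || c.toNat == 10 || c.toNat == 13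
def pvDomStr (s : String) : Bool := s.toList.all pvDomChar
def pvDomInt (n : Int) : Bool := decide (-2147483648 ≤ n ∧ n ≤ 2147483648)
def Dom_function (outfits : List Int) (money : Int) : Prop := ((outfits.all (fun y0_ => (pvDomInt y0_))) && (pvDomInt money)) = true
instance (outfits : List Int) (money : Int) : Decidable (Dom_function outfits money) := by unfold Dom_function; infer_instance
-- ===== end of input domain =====

-- B replaces A's per-start inner rescan by a sorted array of the suffix prefix sums
-- maintained right-to-left, each start's count obtained by one hand-written
-- bisect_right (objective: faster counting mechanism).

-- ===== PORT A =====
-- literal transliteration of A: nested loops building possibleCombinations, then a max-length pass.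
-- outfits[i+j] and possibleCombinations[i] are always in range, so pyGetD is exact here.
def function (outfits : List Int) (money : Int) : Int :=
  let pcs : List (List Int) :=
    (PySem.List.pyRange 0 (outfits.length : Int) 1).foldl
      (fun possibleCombinations i =>
        let inner :=
          (PySem.List.pyRange 0 ((outfits.length : Int) - i) 1).foldl
            (fun (st : Int × List Int) j =>
              let m := st.1 + PySem.List.pyGetD outfits (i + j) 0
              (m, if m ≤ money then st.2 ++ [PySem.List.pyGetD outfits (i + j) 0] else st.2))
            (0, [])
        possibleCombinations ++ [inner.2])
      []
  (PySem.List.pyRange 0 (pcs.length : Int) 1).foldl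
    (fun maxLen i =>
      if maxLen < ((PySem.List.pyGetD pcs i []).length : Int)
      then ((PySem.List.pyGetD pcs i []).length : Int) else maxLen)
    0

-- ===== PORT B =====
-- transliteration of Source B's hand-written _bisect_right: the while loop becomes
-- recursion on hi - lo; a[mid] is always in range (mid < hi ≤ len(a)), so getD is exact.
def brGo (a : List Int) (x : Int) (lo hi : Nat) : Nat :=
  if h : lo < hi then
    if x < a.getD ((lo + hi) / 2) 0 then brGo a x lo ((lo + hi) / 2)
    else brGo a x ((lo + hi) / 2 + 1) hi
  else lo
termination_by hi - lo
decreasing_by all_goals omega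

-- literal transliteration of B's main loop: prefix sums once (prefix[-1] is the last
-- element, always present), then iterate i = n-1 .. 0 keeping (tail, best) as the state.
def function_alt (outfits : List Int) (money : Int) : Int :=
  let pre : List Int :=
    outfits.foldl (fun p x => p ++ [PySem.List.pyGetD p (-1) 0 + x]) [0]
  let n : Int := outfits.length
  let st :=
    (PySem.List.pyRange (n - 1) (-1) (-1)).foldl
      (fun (st : List Int × Int) i =>
        let v := PySem.List.pyGetD pre (i + 1) 0
        let tail := PySem.List.insert st.1 ((brGo st.1 v 0 st.1.length : Nat) : Int) v
        let cnt : Int := (brGo tail (PySem.List.pyGetD pre i 0 + money) 0 tail.length : Nat)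
        (tail, if cnt > st.2 then cnt else st.2))
      ([], 0)
  st.2

-- ===== PRECONDITION & SPEC =====
def Spec_function (outfits : List Int) (money : Int) (out : Int) : Prop := out = function_alt outfits money
instance (outfits : List Int) (money : Int) (out : Int) : Decidable (Spec_function outfits money out) := by unfold Spec_function; infer_instance

-- ===== CLAIM (what is proved, stated in full; the proofs are below) =====
def Claim_equal_function : Prop := ∀ (outfits : List Int) (money : Int), Dom_function outfits money → Spec_function outfits money (function outfits money)

-- ===== LEMMAS AND PROOFS =====

/-- Sum of the first `k` elements. -/
def sumTo (xs : List Int) (k : Nat) : Int := (xs.take k).sum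

/-- Canonical per-start count: number of end positions whose segment sum stays within money. -/
def cnt (xs : List Int) (money : Int) (k : Nat) : Nat :=
  (List.range (xs.length - k)).countP (fun j => decide (sumTo xs (k + j + 1) ≤ sumTo xs k + money))

/-- Canonical running-max form both ports reduce to. -/
def maxFold (xs : List Int) (money : Int) : Int :=
  (List.range xs.length).foldl
    (fun m k => if m < (cnt xs money k : Int) then (cnt xs money k : Int) else m) 0

theorem sumTo_succ (xs : List Int) (k : Nat) (h : k < xs.length) :
    sumTo xs (k + 1) = sumTo xs k + xs[k] := by
  unfold sumTo
  rw [List.take_add_one, List.sum_append, List.getElem?_eq_getElem h]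
  simp

theorem innerA_spec (xs : List Int) (money : Int) (i M : Nat) (h : i + M ≤ xs.length) :
    ((PySem.List.pyRange 0 (M : Int) 1).foldl
      (fun (st : Int × List Int) j =>
        let m := st.1 + PySem.List.pyGetD xs ((i : Int) + j) 0
        (m, if m ≤ money then st.2 ++ [PySem.List.pyGetD xs ((i : Int) + j) 0] else st.2))
      (0, [])).1 = sumTo xs (i + M) - sumTo xs i
    ∧
    ((PySem.List.pyRange 0 (M : Int) 1).foldl
      (fun (st : Int × List Int) j =>
        let m := st.1 + PySem.List.pyGetD xs ((i : Int) + j) 0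
        (m, if m ≤ money then st.2 ++ [PySem.List.pyGetD xs ((i : Int) + j) 0] else st.2))
      (0, [])).2.length
      = (List.range M).countP (fun j => decide (sumTo xs (i + j + 1) ≤ sumTo xs i + money)) := by
  induction M with
  | zero => simp
  | succ M ih =>
    have hM : i + M ≤ xs.length := by omega
    obtain ⟨ih1, ih2⟩ := ih hM
    have hr : PySem.List.pyRange 0 ((M + 1 : Nat) : Int) 1
        = PySem.List.pyRange 0 (M : Int) 1 ++ [(M : Int)] := by
      have := PySem.List.pyRange_one_succ_right (a := 0) (b := (M : Int)) (by positivity)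
      push_cast
      exact this
    have hget : PySem.List.pyGetD xs ((i : Int) + (M : Int)) 0 = xs[i + M]'(by omega) := by
      have : ((i : Int) + (M : Int)) = ((i + M : Nat) : Int) := by push_cast; ring
      rw [this, PySem.List.pyGetD_natCast, List.getD_eq_getElem _ _ (by omega)]
    have hsum : sumTo xs (i + M + 1) = sumTo xs (i + M) + xs[i + M]'(by omega) :=
      sumTo_succ xs (i + M) (by omega)
    rw [hr, List.foldl_append]
    refine ⟨?_, ?_⟩
    · simp only [List.foldl_cons, List.foldl_nil, ih1, hget]
      rw [show i + (M + 1) = i + M + 1 from rfl, hsum]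
      ring
    · simp only [List.foldl_cons, List.foldl_nil, ih1, hget]
      rw [List.range_succ, List.countP_append]
      have hcond : (sumTo xs (i + M) - sumTo xs i + xs[i + M]'(by omega) ≤ money)
          ↔ (sumTo xs (i + M + 1) ≤ sumTo xs i + money) := by rw [hsum]; omega
      by_cases hc : sumTo xs (i + M + 1) ≤ sumTo xs i + money
      · rw [if_pos (hcond.mpr hc)]
        simp [ih2, hc]
      · rw [if_neg (fun hx => hc (hcond.mp hx))]
        simp [ih2, hc]

/-- Partial sums of `xs` starting from accumulated value `a`. -/
def psums (a : Int) : List Int → List Int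
  | [] => []
  | x :: xs => (a + x) :: psums (a + x) xs

theorem foldl_psums (xs : List Int) : ∀ (p : List Int) (h : p ≠ []),
    xs.foldl (fun p x => p ++ [PySem.List.pyGetD p (-1) 0 + x]) p
      = p ++ psums (p.getLast h) xs := by
  induction xs with
  | nil => intro p h; simp [psums]
  | cons x xs ih =>
    intro p h
    have hne : p ++ [p.getLast h + x] ≠ [] := by simp
    simp only [List.foldl_cons, PySem.List.pyGetD_neg_one p 0 h]
    rw [ih (p ++ [p.getLast h + x]) hne]
    have : (p ++ [p.getLast h + x]).getLast hne = p.getLast h + x := by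
      simp
    rw [this]
    simp [psums]

theorem psums_eq (xs : List Int) : ∀ a : Int,
    psums a xs = (List.range xs.length).map (fun k => a + (xs.take (k + 1)).sum) := by
  induction xs with
  | nil => intro a; simp [psums]
  | cons x xs ih =>
    intro a
    simp only [psums, ih (a + x), List.length_cons, List.range_succ_eq_map, List.map_cons,
      List.map_map]
    refine List.cons_eq_cons.mpr ⟨by simp, ?_⟩
    apply List.map_congr_left
    intro k _
    simp [Function.comp, List.take_succ_cons, add_assoc]

theorem prefix_eq (xs : List Int) :
    xs.foldl (fun p x => p ++ [PySem.List.pyGetD p (-1) 0 + x]) [0]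
      = (List.range (xs.length + 1)).map (fun k => sumTo xs k) := by
  rw [foldl_psums xs [0] (by simp), psums_eq]
  simp only [List.getLast_singleton]
  rw [List.range_succ_eq_map, List.map_cons, List.map_map]
  simp [sumTo]

theorem prefix_get (xs : List Int) (k : Nat) (h : k ≤ xs.length) :
    PySem.List.pyGetD ((List.range (xs.length + 1)).map (fun k => sumTo xs k)) (k : Int) 0
      = sumTo xs k := by
  rw [PySem.List.pyGetD_natCast, List.getD_eq_getElem _ _ (by simpa using by omega)]
  simp

theorem pyGetD_map_castRange {β : Type} (f : Int → β) (n k : Nat) (d : β) (h : k < n) :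
    PySem.List.pyGetD (List.map f (List.map (fun k : Nat => (k : Int)) (List.range n))) (k : Int) d
      = f (k : Int) := by
  rw [List.map_map, PySem.List.pyGetD_natCast, List.getD_eq_getElem _ _ (by simpa using h)]
  simp

theorem A_eq_canon (xs : List Int) (money : Int) :
    function xs money = maxFold xs money := by
  unfold function maxFold
  dsimp only []
  have hpcs :
      (PySem.List.pyRange 0 (xs.length : Int) 1).foldl
        (fun possibleCombinations i =>
          possibleCombinations ++
            [((PySem.List.pyRange 0 ((xs.length : Int) - i) 1).foldl
              (fun (st : Int × List Int) j =>
                (st.1 + PySem.List.pyGetD xs (i + j) 0,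
                 if st.1 + PySem.List.pyGetD xs (i + j) 0 ≤ money
                 then st.2 ++ [PySem.List.pyGetD xs (i + j) 0] else st.2))
              (0, [])).2])
        []
      = (PySem.List.pyRange 0 (xs.length : Int) 1).map
          (fun i => ((PySem.List.pyRange 0 ((xs.length : Int) - i) 1).foldl
              (fun (st : Int × List Int) j =>
                (st.1 + PySem.List.pyGetD xs (i + j) 0,
                 if st.1 + PySem.List.pyGetD xs (i + j) 0 ≤ money
                 then st.2 ++ [PySem.List.pyGetD xs (i + j) 0] else st.2))
              (0, [])).2) :=
    PySem.List.foldl_append_singleton_eq_map _ _ []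
  simp only [hpcs]
  have hlen : ((PySem.List.pyRange 0 (xs.length : Int) 1).map
      (fun i => ((PySem.List.pyRange 0 ((xs.length : Int) - i) 1).foldl
        (fun (st : Int × List Int) j =>
          (st.1 + PySem.List.pyGetD xs (i + j) 0,
           if st.1 + PySem.List.pyGetD xs (i + j) 0 ≤ money
           then st.2 ++ [PySem.List.pyGetD xs (i + j) 0] else st.2))
        (0, [])).2)).length = xs.length := by
    simp [PySem.List.length_pyRange_one]
  rw [hlen, PySem.List.pyRange_one 0 (xs.length : Int)]
  simp only [List.foldl_map, zero_add, Int.sub_zero, Int.toNat_natCast]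
  apply PySem.List.foldl_congr_mem
  intro m k hk
  have hk' : k < xs.length := List.mem_range.mp hk
  rw [pyGetD_map_castRange _ xs.length k [] hk']
  have hM : ((xs.length : Int) - (k : Int)) = ((xs.length - k : Nat) : Int) := by omega
  rw [hM]
  have := (innerA_spec xs money k (xs.length - k) (by omega)).2
  simp only [] at this ⊢
  rw [show (((PySem.List.pyRange 0 ((xs.length - k : Nat) : Int) 1).foldl
      (fun (st : Int × List Int) j =>
        (st.1 + PySem.List.pyGetD xs ((k : Int) + j) 0,
         if st.1 + PySem.List.pyGetD xs ((k : Int) + j) 0 ≤ money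
         then st.2 ++ [PySem.List.pyGetD xs ((k : Int) + j) 0] else st.2))
      (0, [])).2).length
      = (List.range (xs.length - k)).countP
          (fun j => decide (sumTo xs (k + j + 1) ≤ sumTo xs k + money)) from this]
  rfl

-- ---- B-side lemmas ----

theorem sorted_getD_mono (a : List Int) (hs : a.Pairwise (· ≤ ·)) (i j : Nat)
    (hij : i ≤ j) (hj : j < a.length) : a.getD i 0 ≤ a.getD j 0 := by
  rcases Nat.eq_or_lt_of_le hij with rfl | hlt
  · exact le_refl _
  · rw [List.getD_eq_getElem _ _ (by omega), List.getD_eq_getElem _ _ hj]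
    exact (List.pairwise_iff_getElem.mp hs) i j (by omega) hj hlt

theorem brGo_ge (a : List Int) (x : Int) (lo hi : Nat) (h : lo ≤ hi) :
    lo ≤ brGo a x lo hi ∧ brGo a x lo hi ≤ hi := by
  induction lo, hi using brGo.induct a x with
  | case1 lo hi hlt hx ih =>
    unfold brGo
    rw [dif_pos hlt, if_pos hx]
    have := ih (by omega)
    exact ⟨this.1, by omega⟩
  | case2 lo hi hlt hx ih =>
    unfold brGo
    rw [dif_pos hlt, if_neg hx]
    have := ih (by omega)
    exact ⟨by omega, this.2⟩
  | case3 lo hi hlt => unfold brGo; rw [dif_neg hlt]; omega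

theorem brGo_cut (a : List Int) (x : Int) (lo hi : Nat)
    (hhi : hi ≤ a.length) (hle : lo ≤ hi) (hs : a.Pairwise (· ≤ ·))
    (hbelow : ∀ j, j < lo → a.getD j 0 ≤ x)
    (habove : ∀ j, hi ≤ j → j < a.length → x < a.getD j 0) :
    (∀ j, j < brGo a x lo hi → a.getD j 0 ≤ x) ∧
    (∀ j, brGo a x lo hi ≤ j → j < a.length → x < a.getD j 0) := by
  induction lo, hi using brGo.induct a x with
  | case1 lo hi hlt hx ih =>
    unfold brGo
    rw [dif_pos hlt, if_pos hx]
    refine ih (by omega) (by omega) hbelow ?_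
    intro j hj hjl
    by_cases hjh : hi ≤ j
    · exact habove j hjh hjl
    · calc x < a.getD ((lo + hi) / 2) 0 := hx
        _ ≤ a.getD j 0 := sorted_getD_mono a hs ((lo + hi) / 2) j hj hjl
  | case2 lo hi hlt hx ih =>
    unfold brGo
    rw [dif_pos hlt, if_neg hx]
    refine ih hhi (by omega) ?_ habove
    intro j hj
    have hmid : (lo + hi) / 2 < a.length := by omega
    calc a.getD j 0 ≤ a.getD ((lo + hi) / 2) 0 := sorted_getD_mono a hs j ((lo + hi) / 2) (by omega) hmid
      _ ≤ x := not_lt.mp hx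
  | case3 lo hi hlt =>
    unfold brGo
    rw [dif_neg hlt]
    exact ⟨fun j hj => hbelow j hj, fun j hj hjl => habove j (by omega) hjl⟩

theorem countP_of_cut (a : List Int) (x : Int) (r : Nat) (hr : r ≤ a.length)
    (h1 : ∀ j, j < r → a.getD j 0 ≤ x)
    (h2 : ∀ j, r ≤ j → j < a.length → x < a.getD j 0) :
    a.countP (fun y => decide (y ≤ x)) = r := by
  have hsplit : a = a.take r ++ a.drop r := (List.take_append_drop r a).symm
  rw [hsplit, List.countP_append]
  have htake : (a.take r).countP (fun y => decide (y ≤ x)) = r := by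
    rw [List.countP_eq_length.mpr, List.length_take_of_le hr]
    intro y hy
    obtain ⟨j, hj, hget⟩ := List.mem_iff_getElem.mp hy
    have hjr : j < r := by
      have := hj; rw [List.length_take] at this; omega
    have : y = a.getD j 0 := by
      rw [List.getD_eq_getElem _ _ (by omega), ← hget, List.getElem_take]
    rw [this] at *
    simpa using h1 j hjr
  have hdrop : (a.drop r).countP (fun y => decide (y ≤ x)) = 0 := by
    rw [List.countP_eq_zero]
    intro y hy
    obtain ⟨j, hj, hget⟩ := List.mem_iff_getElem.mp hy
    have hjl : r + j < a.length := by
      have := hj; rw [List.length_drop] at this; omega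
    have : y = a.getD (r + j) 0 := by
      rw [List.getD_eq_getElem _ _ hjl, ← hget, List.getElem_drop]
    rw [this]
    simpa using not_le.mpr (h2 (r + j) (by omega) hjl)
  rw [← hsplit] at *
  omega

/-- bisect_right on a sorted list counts the elements ≤ x. -/
theorem brGo_countP (a : List Int) (x : Int) (hs : a.Pairwise (· ≤ ·)) :
    brGo a x 0 a.length = a.countP (fun y => decide (y ≤ x)) := by
  have hge := brGo_ge a x 0 a.length (Nat.zero_le _)
  have hcut := brGo_cut a x 0 a.length (le_refl _) (Nat.zero_le _) hs
    (fun j hj => absurd hj (Nat.not_lt_zero j)) (fun j hj hjl => absurd hjl (by omega))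
  exact (countP_of_cut a x _ hge.2 hcut.1 hcut.2).symm

/-- Inserting v at its bisect_right position keeps the list sorted and adds v. -/
theorem insert_at_brGo (a : List Int) (v : Int) (hs : a.Pairwise (· ≤ ·)) :
    (PySem.List.insert a ((brGo a v 0 a.length : Nat) : Int) v).Pairwise (· ≤ ·) ∧
    (PySem.List.insert a ((brGo a v 0 a.length : Nat) : Int) v).Perm (v :: a) := by
  set r := brGo a v 0 a.length with hrdef
  have hge := brGo_ge a v 0 a.length (Nat.zero_le _)
  have hcut := brGo_cut a v 0 a.length (le_refl _) (Nat.zero_le _) hs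
    (fun j hj => absurd hj (Nat.not_lt_zero j)) (fun j hj hjl => absurd hjl (by omega))
  have hrle : r ≤ a.length := hge.2
  rw [PySem.List.insert_natCast a r v hrle]
  constructor
  · have hsplit : a = a.take r ++ a.drop r := (List.take_append_drop r a).symm
    have hsx : (a.take r ++ a.drop r).Pairwise (· ≤ ·) := by rw [← hsplit]; exact hs
    rw [List.pairwise_append] at hsx
    rw [List.pairwise_append]
    refine ⟨hsx.1, ?_, ?_⟩
    · rw [List.pairwise_cons]
      refine ⟨?_, hsx.2.1⟩
      intro y hy
      obtain ⟨j, hj, hget⟩ := List.mem_iff_getElem.mp hy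
      have hjl : r + j < a.length := by
        have := hj; rw [List.length_drop] at this; omega
      have : y = a.getD (r + j) 0 := by
        rw [List.getD_eq_getElem _ _ hjl, ← hget, List.getElem_drop]
      rw [this]
      exact le_of_lt (hcut.2 (r + j) (by omega) hjl)
    · intro y hy z hz
      obtain ⟨j, hj, hget⟩ := List.mem_iff_getElem.mp hy
      have hjr : j < r := by
        have := hj; rw [List.length_take] at this; omega
      have hyv : y ≤ v := by
        have : y = a.getD j 0 := by
          rw [List.getD_eq_getElem _ _ (by omega), ← hget, List.getElem_take]
        rw [this]; exact hcut.1 j hjr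
      rcases List.mem_cons.mp hz with rfl | hz'
      · exact hyv
      · obtain ⟨j', hj', hget'⟩ := List.mem_iff_getElem.mp hz'
        have hjl' : r + j' < a.length := by
          have := hj'; rw [List.length_drop] at this; omega
        have hzz : z = a.getD (r + j') 0 := by
          rw [List.getD_eq_getElem _ _ hjl', ← hget', List.getElem_drop]
        exact le_trans hyv (le_of_lt (by
          rw [hzz]; exact hcut.2 (r + j') (by omega) hjl'))
  · have hmid := @List.perm_middle _ v (a.take r) (a.drop r)
    simpa [List.take_append_drop] using hmid

theorem foldl_max_pull (f : Nat → Int) (l : List Nat) : ∀ b c : Int,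
    l.foldl (fun acc k => max acc (f k)) (max b c)
      = max (l.foldl (fun acc k => max acc (f k)) b) c := by
  induction l with
  | nil => intro b c; rfl
  | cons y t ih =>
    intro b c
    simp only [List.foldl_cons]
    rw [max_right_comm, ih]

/-- The B loop invariant: with `tail` a sorted permutation of the prefix sums
P(m+1..n) and `b` the best so far, the remaining countdown computes the max of `b`
and the counts for starts 0..m-1. -/
theorem loopB (xs : List Int) (money : Int) : ∀ (m : Nat) (S : List Int) (b : Int),
    m ≤ xs.length → S.Pairwise (· ≤ ·) →
    S.Perm ((List.range (xs.length - m)).map (fun t => sumTo xs (m + 1 + t))) →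
    ((PySem.List.pyRange ((m : Int) - 1) (-1) (-1)).foldl
      (fun (st : List Int × Int) i =>
        let v := PySem.List.pyGetD ((List.range (xs.length + 1)).map (fun k => sumTo xs k)) (i + 1) 0
        let tail := PySem.List.insert st.1 ((brGo st.1 v 0 st.1.length : Nat) : Int) v
        let cnt : Int := (brGo tail (PySem.List.pyGetD ((List.range (xs.length + 1)).map (fun k => sumTo xs k)) i 0 + money) 0 tail.length : Nat)
        (tail, if cnt > st.2 then cnt else st.2))
      (S, b)).2
    = (List.range m).foldl (fun acc k => max acc ((cnt xs money k : Nat) : Int)) b := by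
  intro m
  induction m with
  | zero =>
    intro S b _ _ _
    rw [PySem.List.pyRange_neg_one_eq_nil (by omega)]
    rfl
  | succ m ih =>
    intro S b hm hs hp
    have hcons : PySem.List.pyRange (((m + 1 : Nat) : Int) - 1) (-1) (-1)
        = (m : Int) :: PySem.List.pyRange ((m : Int) - 1) (-1) (-1) := by
      have : (((m + 1 : Nat) : Int) - 1) = (m : Int) := by push_cast; ring
      rw [this, PySem.List.pyRange_neg_one_cons (by omega)]
    rw [hcons, List.foldl_cons]
    -- the value inserted is P(m+1)
    have hv : PySem.List.pyGetD ((List.range (xs.length + 1)).map (fun k => sumTo xs k)) ((m : Int) + 1) 0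
        = sumTo xs (m + 1) := by
      have : ((m : Int) + 1) = ((m + 1 : Nat) : Int) := by push_cast; ring
      rw [this, prefix_get xs (m + 1) (by omega)]
    have hlim : PySem.List.pyGetD ((List.range (xs.length + 1)).map (fun k => sumTo xs k)) ((m : Int)) 0
        = sumTo xs m := prefix_get xs m (by omega)
    simp only [hv, hlim]
    set v := sumTo xs (m + 1) with hvdef
    set tail := PySem.List.insert S ((brGo S v 0 S.length : Nat) : Int) v with htail
    obtain ⟨htsorted, htperm⟩ := insert_at_brGo S v hs
    rw [← htail] at htsorted htperm
    have htperm' : tail.Perm ((List.range (xs.length - m)).map (fun t => sumTo xs (m + 1 + t))) := by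
      refine htperm.trans ?_
      have hlen2 : xs.length - m = (xs.length - (m + 1)) + 1 := by omega
      rw [hlen2, List.range_succ_eq_map, List.map_cons, List.map_map]
      refine List.Perm.cons _ (hp.trans (List.Perm.of_eq ?_))
      apply List.map_congr_left
      intro t _
      simp only [Function.comp_apply]
      congr 1
      omega
    -- the count equals cnt xs money m
    have hcnt : brGo tail (sumTo xs m + money) 0 tail.length = cnt xs money m := by
      rw [brGo_countP tail _ htsorted, htperm'.countP_eq]
      unfold cnt
      rw [List.countP_map]
      apply List.countP_congr
      intro t _
      simp only [Function.comp_apply]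
      rw [show m + 1 + t = m + t + 1 from by omega]
    simp only [hcnt]
    rw [ih tail _ (by omega) htsorted htperm']
    have hmax : (if ((cnt xs money m : Nat) : Int) > b then ((cnt xs money m : Nat) : Int) else b)
        = max b ((cnt xs money m : Nat) : Int) := by
      split <;> omega
    rw [hmax, List.range_succ, List.foldl_append, List.foldl_cons, List.foldl_nil,
        ← foldl_max_pull]

theorem maxFold_eq_max (xs : List Int) (money : Int) :
    maxFold xs money
      = (List.range xs.length).foldl (fun acc k => max acc ((cnt xs money k : Nat) : Int)) 0 := by
  unfold maxFold
  apply PySem.List.foldl_congr_mem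
  intro m k _
  split <;> omega

theorem B_eq_canon (xs : List Int) (money : Int) :
    function_alt xs money = maxFold xs money := by
  unfold function_alt
  dsimp only []
  rw [prefix_eq xs, loopB xs money xs.length [] 0 (le_refl _) (by simp) (by simp),
      maxFold_eq_max]

-- ===== VERDICT (by name: the statement is the Claim_ definition above) =====
theorem function_spec : Claim_equal_function := by
  intro outfits money _
  unfold Spec_function
  rw [A_eq_canon, B_eq_canon]
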